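-- pv_equiv track=rewrite | github.com/DavidVH83/NewsBrewer | src/utils/url_extractor.py | _is_tracking_domain
-- ===== SOURCE A (Python) =====
-- _TRACKING_DOMAINS: frozenset[str] = frozenset(
--     {
--         "list-manage.com",
--         "mailchimp.com",
--         "mc.sendgrid.net",
--         "sendgrid.net",
--         "click.convertkit-mail.com",
--         "convertkit-mail.com",
--         "click.mailerlite.com",
--         "mailerlite.com",
--         "tracking.tldrnewsletter.com",
--         "tldrnewsletter.com",
--         "link.mail.beehiiv.com",
--         "beehiiv.com",
--         "click.e.hubspot.com",
--         "t.hubspotemail.net",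
--         "hubspotemail.net",
--         "em.mimecast.com",
--         "bounce.beefree.io",
--         "mailtrack.io",
--         "trk.email",
--         "click.pstmrk.it",
--         "postmarkapp.com",
--         "r.email.substack.com",
--         "substack-post-media.s3.amazonaws.com",
--         "go.pardot.com",
--         "click.e.salesforce.com",
--         "bounce.actionmailbox.org",
--     }
-- )
--
-- def _is_tracking_domain(hostname: str) -> bool:
--     """Return True if *hostname* belongs to a known tracking domain.
--
--     Checks whether the hostname ends with any entry in :data:`_TRACKING_DOMAINS`.
--     A ``pixel.`` subdomain prefix is also treated as a tracking indicator.
--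
--     Args:
--         hostname: The ``netloc`` component of a parsed URL (lowercased).
--
--     Returns:
--         True when the hostname matches a tracking domain pattern.
--     """
--     hostname_lower = hostname.lower().lstrip("www.")
--     if hostname_lower.startswith("pixel."):
--         return True
--     for domain in _TRACKING_DOMAINS:
--         if hostname_lower == domain or hostname_lower.endswith("." + domain):
--             return True
--     return False
-- ===== SOURCE B (Python) =====
-- _TRACKING_DOMAINS: frozenset[str] = frozenset(
--     {
--         "list-manage.com",
--         "mailchimp.com",
--         "mc.sendgrid.net",
--         "sendgrid.net",
--         "click.convertkit-mail.com",
--         "convertkit-mail.com",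
--         "click.mailerlite.com",
--         "mailerlite.com",
--         "tracking.tldrnewsletter.com",
--         "tldrnewsletter.com",
--         "link.mail.beehiiv.com",
--         "beehiiv.com",
--         "click.e.hubspot.com",
--         "t.hubspotemail.net",
--         "hubspotemail.net",
--         "em.mimecast.com",
--         "bounce.beefree.io",
--         "mailtrack.io",
--         "trk.email",
--         "click.pstmrk.it",
--         "postmarkapp.com",
--         "r.email.substack.com",
--         "substack-post-media.s3.amazonaws.com",
--         "go.pardot.com",
--         "click.e.salesforce.com",
--         "bounce.actionmailbox.org",
--     }
-- )
--
-- # the same tracking set, pre-split into its dot-separated label tuples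
-- _TRACKING_LABELS: frozenset[tuple[str, ...]] = frozenset(
--     tuple(d.split(".")) for d in _TRACKING_DOMAINS
-- )
--
--
-- def _is_tracking_domain(hostname: str) -> bool:
--     """Return True if *hostname* belongs to a known tracking domain.
--
--     Instead of scanning the tracking set with endswith tests, split the
--     hostname into its dot-separated labels and look up each label suffix
--     in a set of pre-split label tuples.
--     """
--     hostname_lower = hostname.lower().lstrip("www.")
--     if hostname_lower.startswith("pixel."):
--         return True
--     parts = tuple(hostname_lower.split("."))
--     return any(parts[i:] in _TRACKING_LABELS for i in range(len(parts)))
-- ===== Notes on version B (the rewrite author's own statement) =====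
-- stated objective: alternative
-- what changed: Replaces A's scan over the 26-entry domain set with equality/endswith tests by splitting the hostname into its dot-separated labels once and looking each label suffix up in a set of pre-split label tuples.
import Mathlib
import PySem

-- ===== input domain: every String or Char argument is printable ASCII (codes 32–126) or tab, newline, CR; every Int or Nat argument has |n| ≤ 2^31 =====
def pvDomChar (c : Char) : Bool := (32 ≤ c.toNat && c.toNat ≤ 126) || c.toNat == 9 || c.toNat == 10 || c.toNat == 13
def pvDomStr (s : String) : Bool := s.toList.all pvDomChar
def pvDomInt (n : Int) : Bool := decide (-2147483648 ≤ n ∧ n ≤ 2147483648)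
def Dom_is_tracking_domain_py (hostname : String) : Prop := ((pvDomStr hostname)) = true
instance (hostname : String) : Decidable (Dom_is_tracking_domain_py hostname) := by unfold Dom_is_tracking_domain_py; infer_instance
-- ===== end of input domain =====

-- B splits the hostname into its dot-separated labels once and looks each label suffix up in a
-- set of pre-split label tuples, instead of A's equality/endswith scan over the 26 domain strings
-- (objective: alternative).

-- ===== PORT A =====
-- the module-level _TRACKING_DOMAINS set, as the distinct strings (char lists)
def pvTrackingDomains : List (List Char) :=
  [ "list-manage.com".toList, "mailchimp.com".toList, "mc.sendgrid.net".toList,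
    "sendgrid.net".toList, "click.convertkit-mail.com".toList, "convertkit-mail.com".toList,
    "click.mailerlite.com".toList, "mailerlite.com".toList, "tracking.tldrnewsletter.com".toList,
    "tldrnewsletter.com".toList, "link.mail.beehiiv.com".toList, "beehiiv.com".toList,
    "click.e.hubspot.com".toList, "t.hubspotemail.net".toList, "hubspotemail.net".toList,
    "em.mimecast.com".toList, "bounce.beefree.io".toList, "mailtrack.io".toList,
    "trk.email".toList, "click.pstmrk.it".toList, "postmarkapp.com".toList,
    "r.email.substack.com".toList, "substack-post-media.s3.amazonaws.com".toList,
    "go.pardot.com".toList, "click.e.salesforce.com".toList, "bounce.actionmailbox.org".toList ]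

-- hand port (exact): Python's s.lstrip("www.") drops leading characters from the SET {'w','.'}
def pvLstripWww (s : List Char) : List Char := s.dropWhile (fun c => c == 'w' || c == '.')

def is_tracking_domain_py (hostname : String) : Bool :=
  let hostname_lower := pvLstripWww (PySem.Chars.lower hostname.toList)
  if PySem.Chars.startswith hostname_lower "pixel.".toList then true
  else pvTrackingDomains.any (fun domain =>
    hostname_lower == domain || PySem.Chars.endswith hostname_lower ('.' :: domain))

-- ===== PORT B =====
-- _TRACKING_LABELS = frozenset(tuple(d.split(".")) for d in _TRACKING_DOMAINS): the distinct
-- label tuples, written out as Source B's module-level constant evaluates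
def pvTrackingLabels : List (List (List Char)) :=
  [ ["list-manage".toList, "com".toList],
    ["mailchimp".toList, "com".toList],
    ["mc".toList, "sendgrid".toList, "net".toList],
    ["sendgrid".toList, "net".toList],
    ["click".toList, "convertkit-mail".toList, "com".toList],
    ["convertkit-mail".toList, "com".toList],
    ["click".toList, "mailerlite".toList, "com".toList],
    ["mailerlite".toList, "com".toList],
    ["tracking".toList, "tldrnewsletter".toList, "com".toList],
    ["tldrnewsletter".toList, "com".toList],
    ["link".toList, "mail".toList, "beehiiv".toList, "com".toList],
    ["beehiiv".toList, "com".toList],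
    ["click".toList, "e".toList, "hubspot".toList, "com".toList],
    ["t".toList, "hubspotemail".toList, "net".toList],
    ["hubspotemail".toList, "net".toList],
    ["em".toList, "mimecast".toList, "com".toList],
    ["bounce".toList, "beefree".toList, "io".toList],
    ["mailtrack".toList, "io".toList],
    ["trk".toList, "email".toList],
    ["click".toList, "pstmrk".toList, "it".toList],
    ["postmarkapp".toList, "com".toList],
    ["r".toList, "email".toList, "substack".toList, "com".toList],
    ["substack-post-media".toList, "s3".toList, "amazonaws".toList, "com".toList],
    ["go".toList, "pardot".toList, "com".toList],
    ["click".toList, "e".toList, "salesforce".toList, "com".toList],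
    ["bounce".toList, "actionmailbox".toList, "org".toList] ]

-- Source B's hostname_lower.split(".") ported as the corresponding library function List.splitOn
-- (exact for a one-character separator); parts[i:] with 0 ≤ i ≤ len(parts) is parts.drop i
def is_tracking_domain_py_alt (hostname : String) : Bool :=
  let hostname_lower := (PySem.Chars.lower hostname.toList).dropWhile (fun c => c == 'w' || c == '.')
  if PySem.Chars.startswith hostname_lower "pixel.".toList then true
  else
    let parts := hostname_lower.splitOn '.'
    (List.range parts.length).any (fun i => pvTrackingLabels.contains (parts.drop i))

-- ===== PRECONDITION & SPEC =====
def Spec_is_tracking_domain_py (hostname : String) (out : Bool) : Prop := out = is_tracking_domain_py_alt hostname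
instance (hostname : String) (out : Bool) : Decidable (Spec_is_tracking_domain_py hostname out) := by unfold Spec_is_tracking_domain_py; infer_instance

-- ===== CLAIM (what is proved, stated in full; the proofs are below) =====
def Claim_equal_is_tracking_domain_py : Prop := ∀ (hostname : String), Dom_is_tracking_domain_py hostname → Spec_is_tracking_domain_py hostname (is_tracking_domain_py hostname)

-- ===== LEMMAS AND PROOFS =====

-- every piece produced by splitOnP is free of separators
theorem pvSplitOnP_parts {α : Type} (p : α → Bool) (xs : List α) :
    ∀ l ∈ xs.splitOnP p, ∀ a ∈ l, p a = false := by
  induction xs with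
  | nil => simp [List.splitOnP_nil]
  | cons x xs ih =>
    rw [List.splitOnP_cons]
    by_cases hx : p x
    · simp only [hx, if_true]
      intro l hl
      rcases List.mem_cons.mp hl with rfl | hl
      · simp
      · exact ih l hl
    · simp only [hx]
      obtain ⟨h, t, ht⟩ := List.exists_cons_of_ne_nil (List.splitOnP_ne_nil p xs)
      rw [ht, List.modifyHead_cons]
      intro l hl
      rcases List.mem_cons.mp hl with rfl | hl
      · intro a ha
        rcases List.mem_cons.mp ha with rfl | ha
        · exact Bool.eq_false_iff.mpr hx
        · exact ih h (ht ▸ List.mem_cons_self) a ha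
      · exact ih l (ht ▸ List.mem_cons_of_mem _ hl)

theorem pvSplitOn_parts (xs : List Char) (c : Char) : ∀ l ∈ xs.splitOn c, c ∉ l := by
  intro l hl hc
  have := pvSplitOnP_parts (· == c) xs l hl c hc
  simp at this

-- a suffix of an append is a suffix of the tail or carries the whole tail
theorem pvSuffix_append {α : Type} {t x y : List α} (h : t <:+ x ++ y) :
    t <:+ y ∨ ∃ s, s ≠ [] ∧ s <:+ x ∧ t = s ++ y := by
  obtain ⟨p, hp⟩ := h
  rcases List.append_eq_append_iff.mp hp with ⟨as, hx, ht⟩ | ⟨bs, hp', hy⟩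
  · rcases List.eq_nil_or_concat' as with rfl | _
    · exact Or.inl (by simp [ht])
    · exact Or.inr ⟨as, by rintro rfl; simp_all, ⟨p, hx.symm⟩, ht⟩
  · exact Or.inl ⟨bs, hy.symm⟩

-- intercalation of separator-free nonempty part lists is injective
theorem pvIntercalate_inj (c : Char) {ps ls : List (List Char)} (hp : ps ≠ []) (hl : ls ≠ [])
    (hpc : ∀ l ∈ ps, c ∉ l) (hlc : ∀ l ∈ ls, c ∉ l)
    (h : [c].intercalate ps = [c].intercalate ls) : ps = ls := by
  rw [← List.splitOn_intercalate ps c hpc hp, h, List.splitOn_intercalate ls c hlc hl]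

-- intercalate over a two-or-more part list unfolds one step
theorem pvIntercalate_cons (c : Char) (a : List Char) {rest : List (List Char)} (h : rest ≠ []) :
    [c].intercalate (a :: rest) = a ++ c :: [c].intercalate rest := by
  obtain ⟨b, t, rfl⟩ := List.exists_cons_of_ne_nil h
  simp [List.intercalate, List.intersperse]

-- the heart: a separator-free part list ls is "equal or a dot-boundary suffix" of ps
-- exactly when ls is a drop of ps
theorem pvSuffix_iff_drop (c : Char) (ps : List (List Char)) (hp : ps ≠ [])
    (hpc : ∀ l ∈ ps, c ∉ l) (ls : List (List Char)) (hl : ls ≠ []) (hlc : ∀ l ∈ ls, c ∉ l) :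
    ([c].intercalate ps = [c].intercalate ls ∨ c :: [c].intercalate ls <:+ [c].intercalate ps)
      ↔ ∃ i, i < ps.length ∧ ps.drop i = ls := by
  induction ps with
  | nil => exact absurd rfl hp
  | cons a rest ih =>
    rcases List.eq_nil_or_concat' rest with rfl | hrest
    · -- single part: intercalate = a, which contains no c, so only equality can hold
      have ha : [c].intercalate [a] = a := by simp [List.intercalate]
      rw [ha]
      constructor
      · rintro (he | hs)
        · refine ⟨0, by simp, ?_⟩
          simp only [List.drop_zero]
          exact pvIntercalate_inj c (by simp) hl hpc hlc (he ▸ ha)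
        · exact absurd (hs.mem List.mem_cons_self) (hpc a List.mem_cons_self)
      · rintro ⟨i, hi, hd⟩
        have : i = 0 := by simpa using hi
        subst this
        exact Or.inl (by rw [← hd]; simp [List.intercalate])
    · have hne : rest ≠ [] := by rintro rfl; simp_all
      have hrc : ∀ l ∈ rest, c ∉ l := fun l h => hpc l (List.mem_cons_of_mem _ h)
      have hstep := pvIntercalate_cons c a hne
      rw [hstep]
      constructor
      · rintro (he | hs)
        · refine ⟨0, by simp, ?_⟩
          simp only [List.drop_zero]
          exact pvIntercalate_inj c (by simp) hl hpc hlc (by rw [hstep, he])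
        · rcases pvSuffix_append hs with hs' | ⟨s, hsne, hsa, heq⟩
          · rcases List.suffix_cons_iff.mp hs' with he' | hs''
            · have he2 : [c].intercalate rest = [c].intercalate ls := by
                injection he' with _ h2
                exact h2.symm
              have : rest = ls := pvIntercalate_inj c hne hl hrc hlc he2
              exact ⟨1, by simp [List.length_pos_iff.mpr hne], by simp [this]⟩
            · obtain ⟨i, hi, hd⟩ := (ih hne hrc).mp (Or.inr hs'')
              exact ⟨i + 1, by simpa using hi, by simpa using hd⟩
          · obtain ⟨s0, st, rfl⟩ := List.exists_cons_of_ne_nil hsne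
            have : s0 = c := (List.cons.injEq .. ▸ heq).1.symm
            exact absurd (hsa.mem (this ▸ List.mem_cons_self)) (hpc a List.mem_cons_self)
      · rintro ⟨i, hi, hd⟩
        match i with
        | 0 =>
          simp only [List.drop_zero] at hd
          exact Or.inl (by rw [← hd, hstep])
        | 1 =>
          simp only [List.drop_succ_cons, List.drop_zero] at hd
          exact Or.inr (by rw [← hd]; exact (List.suffix_append _ _))
        | (j + 2) =>
          have hd' : rest.drop (j + 1) = ls := hd
          have hj : j + 1 < rest.length := by simpa using hi
          rcases (ih hne hrc).mpr ⟨j + 1, hj, hd'⟩ with he | hs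
          · exact Or.inr (he ▸ List.suffix_append _ _)
          · exact Or.inr (hs.trans ((List.suffix_cons _ _).trans (List.suffix_append _ _)))

-- B's pre-split label tuples are exactly the split images of A's domain strings
theorem pvLabels_eq : pvTrackingLabels = pvTrackingDomains.map (fun d => d.splitOn '.') := by decide

-- the shared body, for an arbitrary stripped hostname h
theorem pvBody_eq (h : List Char) :
    (pvTrackingDomains.any (fun d => h == d || PySem.Chars.endswith h ('.' :: d)))
      = ((List.range (h.splitOn '.').length).any
          (fun i => pvTrackingLabels.contains ((h.splitOn '.').drop i))) := by
  rw [Bool.eq_iff_iff]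
  simp only [List.any_eq_true, List.mem_range, Bool.or_eq_true, beq_iff_eq,
    List.contains_eq_mem, decide_eq_true_eq, pvLabels_eq, List.mem_map,
    PySem.Chars.endswith_iff]
  constructor
  · rintro ⟨d, hd, hcase⟩
    have hdl : ∀ l ∈ d.splitOn '.', '.' ∉ l := pvSplitOn_parts d '.'
    have hhl : ∀ l ∈ h.splitOn '.', '.' ∉ l := pvSplitOn_parts h '.'
    have hh : [('.' : Char)].intercalate (h.splitOn '.') = h := List.intercalate_splitOn h '.'
    have hdd : [('.' : Char)].intercalate (d.splitOn '.') = d := List.intercalate_splitOn d '.'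
    obtain ⟨i, hi, hdrop⟩ := (pvSuffix_iff_drop '.' (h.splitOn '.') (List.splitOnP_ne_nil _ h)
      hhl (d.splitOn '.') (List.splitOnP_ne_nil _ d) hdl).mp
      (by rw [hh, hdd]; exact hcase)
    exact ⟨i, hi, d, hd, hdrop.symm⟩
  · rintro ⟨i, hi, d, hd, hdrop⟩
    have hdl : ∀ l ∈ d.splitOn '.', '.' ∉ l := pvSplitOn_parts d '.'
    have hhl : ∀ l ∈ h.splitOn '.', '.' ∉ l := pvSplitOn_parts h '.'
    have hh : [('.' : Char)].intercalate (h.splitOn '.') = h := List.intercalate_splitOn h '.'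
    have hdd : [('.' : Char)].intercalate (d.splitOn '.') = d := List.intercalate_splitOn d '.'
    have := (pvSuffix_iff_drop '.' (h.splitOn '.') (List.splitOnP_ne_nil _ h)
      hhl (d.splitOn '.') (List.splitOnP_ne_nil _ d) hdl).mpr ⟨i, hi, hdrop.symm⟩
    rw [hh, hdd] at this
    exact ⟨d, hd, this⟩

-- ===== VERDICT (by name: the statement is the Claim_ definition above) =====
theorem is_tracking_domain_py_spec : Claim_equal_is_tracking_domain_py := by
  intro hostname _
  show is_tracking_domain_py hostname = is_tracking_domain_py_alt hostname
  simp only [is_tracking_domain_py, is_tracking_domain_py_alt, pvLstripWww]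
  rw [pvBody_eq]
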